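-- pv_equiv track=rewrite | github.com/Benjination/CPE-ABET-UTA | app.py | build_mapping_from_rows
-- ===== SOURCE A (Python) =====
-- def build_mapping_from_rows(courses_data, rows):
--     """Convert DB rows to the existing mapping JSON shape expected by the UI."""
--     course_to_abet = {code: [] for code in courses_data.keys()}
--     abet_to_course = {}
--
--     for outcome_id, course_code in rows:
--         abet_to_course.setdefault(outcome_id, []).append(course_code)
--         course_to_abet.setdefault(course_code, []).append(outcome_id)
--
--     for outcome_id in abet_to_course:
--         abet_to_course[outcome_id] = sorted(set(abet_to_course[outcome_id]))
--
--     for course_code in course_to_abet: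
--         course_to_abet[course_code] = sorted(set(course_to_abet[course_code]))
--
--     return {
--         'abet_to_course': abet_to_course,
--         'course_to_abet': course_to_abet,
--     }
-- ===== SOURCE B (Python) =====
-- def build_mapping_from_rows(courses_data, rows):
--     """Convert DB rows to the existing mapping JSON shape expected by the UI."""
--     outcome_ids = list(dict.fromkeys(o for o, _ in rows))
--     course_codes = list(dict.fromkeys(list(courses_data) + [c for _, c in rows]))
--     return {
--         'abet_to_course': {o: sorted({c for i, c in rows if i == o})
--                            for o in outcome_ids},
--         'course_to_abet': {c: sorted({i for i, c2 in rows if c2 == c})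
--                            for c in course_codes},
--     }
-- ===== Notes on version B (the rewrite author's own statement) =====
-- stated objective: simpler
-- what changed: Replaces the mutable hash-accumulate-then-sort-in-place scheme with direct comprehensions: key orders are obtained once via dict.fromkeys dedup and each bucket is computed declaratively as sorted({...}) over a filter of rows, with no intermediate mutable dicts.
import Mathlib
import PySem

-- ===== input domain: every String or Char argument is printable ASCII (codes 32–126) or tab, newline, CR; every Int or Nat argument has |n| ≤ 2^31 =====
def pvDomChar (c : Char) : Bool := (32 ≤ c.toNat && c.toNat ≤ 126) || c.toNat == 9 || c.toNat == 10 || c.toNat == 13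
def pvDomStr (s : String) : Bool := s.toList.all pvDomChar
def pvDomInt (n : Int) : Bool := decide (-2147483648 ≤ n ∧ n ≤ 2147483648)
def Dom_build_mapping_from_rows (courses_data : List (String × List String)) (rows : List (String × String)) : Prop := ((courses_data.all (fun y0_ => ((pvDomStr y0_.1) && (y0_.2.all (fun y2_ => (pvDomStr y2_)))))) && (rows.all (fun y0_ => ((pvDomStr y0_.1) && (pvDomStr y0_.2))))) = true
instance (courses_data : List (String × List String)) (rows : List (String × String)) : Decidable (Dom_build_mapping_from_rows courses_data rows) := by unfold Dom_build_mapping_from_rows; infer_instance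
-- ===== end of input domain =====

-- B replaces A's mutable hash-accumulate-then-sort-in-place scheme by direct per-key
-- comprehensions over deduplicated key lists (objective: simpler; same result, not faster).

-- ===== PORT A =====
def build_mapping_from_rows (courses_data : List (String × List String)) (rows : List (String × String)) : List (String × List (String × List String)) :=
  -- course_to_abet = {code: [] for code in courses_data.keys()}
  let course_to_abet0 : PySem.Dict String (List String) :=
    (courses_data.map Prod.fst).foldl (fun d code => d.insert code ([] : List String)) PySem.Dict.empty
  -- for outcome_id, course_code in rows: setdefault(k, []).append(v) on both dicts
  -- (= d[k] = d.get(k, []) + [v], key appended when new: PySem.Dict.modify)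
  let st :=
    rows.foldl
      (fun (st : PySem.Dict String (List String) × PySem.Dict String (List String)) p =>
        (st.1.modify p.1 [] (fun v => v ++ [p.2]), st.2.modify p.2 [] (fun v => v ++ [p.1])))
      (PySem.Dict.empty, course_to_abet0)
  -- for k in d: d[k] = sorted(set(d[k]))   (overwrite keeps the key's position)
  let abet_to_course :=
    st.1.keys.foldl
      (fun d k => d.insert k (PySem.List.sorted (PySem.Set.ofList (d.getD k [])) (fun x => x) false)) st.1
  let course_to_abet :=
    st.2.keys.foldl
      (fun d k => d.insert k (PySem.List.sorted (PySem.Set.ofList (d.getD k [])) (fun x => x) false)) st.2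
  [("abet_to_course", abet_to_course.items), ("course_to_abet", course_to_abet.items)]

-- ===== PORT B =====
def build_mapping_from_rows_alt (courses_data : List (String × List String)) (rows : List (String × String)) : List (String × List (String × List String)) :=
  -- outcome_ids = list(dict.fromkeys(o for o, _ in rows))
  let outcome_ids := PySem.List.dedup (rows.map Prod.fst)
  -- course_codes = list(dict.fromkeys(list(courses_data) + [c for _, c in rows]))
  let course_codes := PySem.List.dedup (courses_data.map Prod.fst ++ rows.map Prod.snd)
  [("abet_to_course",
      outcome_ids.map (fun o =>
        (o, PySem.List.sorted (PySem.Set.ofList ((rows.filter (fun p => p.1 == o)).map (fun p => p.2))) (fun x => x) false))),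
   ("course_to_abet",
      course_codes.map (fun c =>
        (c, PySem.List.sorted (PySem.Set.ofList ((rows.filter (fun p => p.2 == c)).map (fun p => p.1))) (fun x => x) false)))]

-- ===== PRECONDITION & SPEC =====
def Spec_build_mapping_from_rows (courses_data : List (String × List String)) (rows : List (String × String)) (out : List (String × List (String × List String))) : Prop := out = build_mapping_from_rows_alt courses_data rows
instance (courses_data : List (String × List String)) (rows : List (String × String)) (out : List (String × List (String × List String))) : Decidable (Spec_build_mapping_from_rows courses_data rows out) := by unfold Spec_build_mapping_from_rows; infer_instance

-- ===== CLAIM (what is proved, stated in full; the proofs are below) =====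
def Claim_equal_build_mapping_from_rows : Prop := ∀ (courses_data : List (String × List String)) (rows : List (String × String)), Dom_build_mapping_from_rows courses_data rows → Spec_build_mapping_from_rows courses_data rows (build_mapping_from_rows courses_data rows)

-- ===== LEMMAS AND PROOFS =====

-- a list of pairs whose first components are ks and whose second components are g of the first IS ks.map (fun k => (k, g k))
lemma pv_list_eq_map {α β : Type} (g : α → β) :
    ∀ (l : List (α × β)) (ks : List α), l.map Prod.fst = ks → (∀ p ∈ l, p.2 = g p.1) →
      l = ks.map (fun k => (k, g k)) := by
  intro l
  induction l with
  | nil => intro ks h _; simp_all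
  | cons p t ih =>
    intro ks h hv
    cases ks with
    | nil => simp at h
    | cons k kt =>
      simp only [List.map_cons, List.cons.injEq] at h
      obtain ⟨h1, h2⟩ := h
      have hp := hv p (by simp)
      refine List.cons_eq_cons.mpr ⟨?_, ih kt h2 (fun q hq => hv q (by simp [hq]))⟩
      cases p; simp_all

-- updating a set with elements it already contains is the identity
lemma pv_update_self {α : Type} [BEq α] [LawfulBEq α] :
    ∀ (l s : List α), (∀ x ∈ l, x ∈ s) → PySem.Set.update s l = s := by
  intro l
  induction l with
  | nil => intro s _; rfl
  | cons x t ih =>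
    intro s h
    show PySem.Set.update (PySem.Set.add s x) t = s
    rw [PySem.Set.add_of_mem (h x (by simp))]
    exact ih s (fun y hy => h y (by simp [hy]))

-- seeding a dict with empty lists leaves every getD _ [] equal to []
lemma pv_getD_insert_nil :
    ∀ (ks : List String) (d : PySem.Dict String (List String)),
      (∀ k, d.getD k [] = []) →
      ∀ k, (ks.foldl (fun d c => d.insert c ([] : List String)) d).getD k [] = [] := by
  intro ks
  induction ks with
  | nil => intro d h k; exact h k
  | cons c t ih =>
    intro d h k
    refine ih _ (fun k' => ?_) k
    rw [PySem.Dict.getD_insert]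
    split
    · rfl
    · exact h k'

-- the normalisation loop 'for k in d: d[k] = f(d[k])' at getD level
lemma pv_getD_norm (f : List String → List String) :
    ∀ (ks : List String) (d : PySem.Dict String (List String)) (k : String), ks.Nodup →
      (ks.foldl (fun d k => d.insert k (f (d.getD k []))) d).getD k []
        = if k ∈ ks then f (d.getD k []) else d.getD k [] := by
  intro ks
  induction ks with
  | nil => simp
  | cons k0 t ih =>
    intro d k hnd
    rw [List.nodup_cons] at hnd
    rw [List.foldl_cons, ih _ k hnd.2]
    by_cases hk : k ∈ t
    · have hne : k ≠ k0 := fun e => hnd.1 (e ▸ hk)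
      rw [PySem.Dict.getD_insert]
      simp [hk, hne]
    · by_cases he : k = k0
      · subst he; rw [PySem.Dict.getD_insert]; simp [hk]
      · simp [hk, he, PySem.Dict.getD_insert]

-- the normalisation loop at items level: keys keep their order, every value gets f applied
lemma pv_items_norm (f : List String → List String) (m : PySem.Dict String (List String))
    (hnd : m.keys.Nodup) :
    (m.keys.foldl (fun d k => d.insert k (f (d.getD k []))) m).items
      = m.keys.map (fun k => (k, f (m.getD k []))) := by
  have hkeys : (m.keys.foldl (fun d k => d.insert k (f (d.getD k []))) m).keys = m.keys := by
    rw [PySem.Dict.keys_foldl_insert]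
    exact pv_update_self _ _ (fun x h => h)
  have hndF : (m.keys.foldl (fun d k => d.insert k (f (d.getD k []))) m).keys.Nodup := by
    rw [hkeys]; exact hnd
  refine pv_list_eq_map _ _ _ hkeys ?_
  intro p hp
  have h1 : p.1 ∈ m.keys := by
    rw [← hkeys]; exact PySem.Dict.mem_keys_of_mem_items _ hp
  have h2 := PySem.Dict.getD_of_mem_items _ (show (p.1, p.2) ∈ _ from hp) hndF ([] : List String)
  rw [pv_getD_norm f m.keys m p.1 hnd] at h2
  rw [← h2]; simp [h1]

-- ===== VERDICT (by name: the statement is the Claim_ definition above) =====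
theorem build_mapping_from_rows_spec : Claim_equal_build_mapping_from_rows := by
  intro courses_data rows _
  unfold Spec_build_mapping_from_rows
  simp only [build_mapping_from_rows, build_mapping_from_rows_alt]
  rw [PySem.List.foldl_prod_mk
        (fun (d : PySem.Dict String (List String)) (p : String × String) => d.modify p.1 [] (fun v => v ++ [p.2]))
        (fun (d : PySem.Dict String (List String)) (p : String × String) => d.modify p.2 [] (fun v => v ++ [p.1])) rows]
  set A1 := List.foldl (fun (d : PySem.Dict String (List String)) (p : String × String) => d.modify p.1 [] (fun v => v ++ [p.2])) PySem.Dict.empty rows with hA1def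
  set d0 := List.foldl (fun (d : PySem.Dict String (List String)) (c : String) => d.insert c []) PySem.Dict.empty (courses_data.map Prod.fst) with hd0def
  set C1 := List.foldl (fun (d : PySem.Dict String (List String)) (p : String × String) => d.modify p.2 [] (fun v => v ++ [p.1])) d0 rows with hC1def
  have hAkeys : A1.keys = PySem.List.dedup (rows.map Prod.fst) := by
    rw [hA1def, PySem.Dict.keys_foldl_modify_key rows Prod.fst [] (fun _ p => fun v => v ++ [p.2]) PySem.Dict.empty]
    rfl
  have hAnodup : A1.keys.Nodup := by
    rw [hAkeys, PySem.List.dedup_eq_ofList]; exact PySem.Set.nodup_ofList _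
  have hAgetD : ∀ k, A1.getD k [] = (rows.filter (fun p => p.1 == k)).map (fun p => p.2) := by
    intro k
    rw [hA1def, PySem.Dict.getD_foldl_modify_append rows PySem.Dict.empty k, PySem.Dict.getD_empty]
    rfl
  have hd0keys : d0.keys = PySem.Set.ofList (courses_data.map Prod.fst) := by
    rw [hd0def, PySem.Dict.keys_foldl_insert (courses_data.map Prod.fst) (fun _ _ => []) PySem.Dict.empty]
    rfl
  have hCkeys : C1.keys = PySem.List.dedup (courses_data.map Prod.fst ++ rows.map Prod.snd) := by
    rw [hC1def, PySem.Dict.keys_foldl_modify_key rows Prod.snd [] (fun _ p => fun v => v ++ [p.1]) d0,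
      hd0keys, PySem.List.dedup_eq_ofList, PySem.Set.ofList_append]
  have hCnodup : C1.keys.Nodup := by
    rw [hCkeys, PySem.List.dedup_eq_ofList]; exact PySem.Set.nodup_ofList _
  have hswap : C1 = List.foldl (fun (d : PySem.Dict String (List String)) (p : String × String) => d.modify p.1 [] (fun v => v ++ [p.2])) d0 (rows.map Prod.swap) := by
    rw [List.foldl_map]; rfl
  have hCgetD : ∀ k, C1.getD k [] = (rows.filter (fun p => p.2 == k)).map (fun p => p.1) := by
    intro k
    rw [hswap, PySem.Dict.getD_foldl_modify_append (rows.map Prod.swap) d0 k,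
      pv_getD_insert_nil (courses_data.map Prod.fst) PySem.Dict.empty (fun k' => PySem.Dict.getD_empty k' []) k,
      List.filter_map]
    simp [List.map_map, Function.comp_def]
  rw [pv_items_norm (fun v => PySem.List.sorted (PySem.Set.ofList v) (fun x => x) false) A1 hAnodup,
    pv_items_norm (fun v => PySem.List.sorted (PySem.Set.ofList v) (fun x => x) false) C1 hCnodup,
    hAkeys, hCkeys]
  simp only [hAgetD, hCgetD]
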